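-- pv_equiv track=rewrite | github.com/ayushrajani07/G6_ | tests/test_config_schema_doc_sync.py | _is_documented
-- ===== SOURCE A (Python) =====
-- from typing import Set
--
-- def _is_documented(key: str, documented: Set[str]) -> bool:
--     if key in documented:
--         return True
--     # Parent wildcard match: any documented entry ending with .* that matches prefix
--     parts = key.split('.')
--     for i in range(1, len(parts) + 1):
--         prefix = '.'.join(parts[:i])
--         if prefix + '.*' in documented:
--             return True
--     return False
-- ===== SOURCE B (Python) =====
-- def _is_documented(key: str, documented) -> bool:
--     # Single scan over the documented entries instead of building the key's
--     # dotted prefixes and probing the set.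
--     for entry in documented:
--         if entry == key:
--             return True
--         if entry.endswith('.*'):
--             base = entry[:-2]
--             if key == base or key.startswith(base + '.'):
--                 return True
--     return False
-- ===== Notes on version B (the rewrite author's own statement) =====
-- stated objective: alternative
-- what changed: Instead of splitting the key into parts and probing the set with every dotted prefix plus '.*', B makes a single pass over the documented entries, matching each entry against the key directly (equality, or wildcard entries '<base>.*' via key == base / key.startswith(base + '.')).
import Mathlib
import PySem

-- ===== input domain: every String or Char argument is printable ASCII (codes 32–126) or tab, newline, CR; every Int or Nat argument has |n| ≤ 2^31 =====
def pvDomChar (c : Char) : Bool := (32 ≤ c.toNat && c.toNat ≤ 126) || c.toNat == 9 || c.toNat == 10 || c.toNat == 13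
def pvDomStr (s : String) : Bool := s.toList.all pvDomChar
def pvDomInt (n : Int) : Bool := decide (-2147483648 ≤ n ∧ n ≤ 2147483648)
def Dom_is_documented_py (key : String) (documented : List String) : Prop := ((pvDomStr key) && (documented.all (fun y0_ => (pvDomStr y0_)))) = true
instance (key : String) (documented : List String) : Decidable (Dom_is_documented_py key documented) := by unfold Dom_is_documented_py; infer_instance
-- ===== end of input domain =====

-- B replaces A's build-every-dotted-prefix-and-probe loop by a single scan over the
-- documented entries, matching each entry (exact or '<base>.*' wildcard) against the key.


-- ===== PORT A =====
-- the for-loop over range(1, len(parts)+1) with its early 'return True'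
def pvALoop (docs : List (List Char)) (parts : List (List Char)) : List Int → Bool
  | [] => false
  | i :: rest =>
      -- prefix = '.'.join(parts[:i]);  prefix + '.*'
      if docs.contains (PySem.Chars.join ['.'] (PySem.List.slice parts none (some i)) ++ ['.', '*']) then
        true
      else pvALoop docs parts rest

-- strings handled on the List Char side throughout (PySem convention);
-- key.split('.') is List.splitOn '.' — exact for the single-character separator '.'
def is_documented_py (key : String) (documented : List String) : Bool :=
  let k := key.toList
  let docs := documented.map String.toList
  if docs.contains k then true
  else
    let parts := k.splitOn '.'
    pvALoop docs parts (PySem.List.pyRange 1 ((parts.length : Int) + 1) 1)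

-- ===== PORT B =====
-- the single for-loop over documented with its early returns
def pvBScan (k : List Char) : List (List Char) → Bool
  | [] => false
  | e :: rest =>
      if e == k then true
      else if PySem.Chars.endswith e ['.', '*'] then
        let base := PySem.List.slice e none (some (-2))
        if k == base || PySem.Chars.startswith k (base ++ ['.']) then true
        else pvBScan k rest
      else pvBScan k rest

def is_documented_py_alt (key : String) (documented : List String) : Bool :=
  pvBScan key.toList (documented.map String.toList)

-- ===== PRECONDITION & SPEC =====
def Spec_is_documented_py (key : String) (documented : List String) (out : Bool) : Prop := out = is_documented_py_alt key documented
instance (key : String) (documented : List String) (out : Bool) : Decidable (Spec_is_documented_py key documented out) := by unfold Spec_is_documented_py; infer_instance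

-- ===== CLAIM (what is proved, stated in full; the proofs are below) =====
def Claim_equal_is_documented_py : Prop := ∀ (key : String) (documented : List String), Dom_is_documented_py key documented → Spec_is_documented_py key documented (is_documented_py key documented)

-- ===== LEMMAS AND PROOFS =====

-- the common spec: some documented entry matches the key (exactly, or as a '<base>.*' wildcard)
def pvMatches (k e : List Char) : Prop :=
  e = k ∨ ∃ q, e = q ++ ['.', '*'] ∧ (q = k ∨ q ++ ['.'] <+: k)

-- a non-matching entry can be dropped from the scan
theorem pv_scan_step {k e : List Char} {rest : List (List Char)} (hne : ¬ pvMatches k e) :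
    (∃ x ∈ rest, pvMatches k x) ↔ (∃ x ∈ e :: rest, pvMatches k x) := by
  constructor
  · rintro ⟨x, hx, hm⟩; exact ⟨x, List.mem_cons_of_mem _ hx, hm⟩
  · rintro ⟨x, hx, hm⟩
    rcases List.mem_cons.1 hx with rfl | hx
    · exact absurd hm hne
    · exact ⟨x, hx, hm⟩

-- B's loop is the scan for pvMatches
theorem pvBScan_eq_true_iff (k : List Char) (docs : List (List Char)) :
    pvBScan k docs = true ↔ ∃ e ∈ docs, pvMatches k e := by
  induction docs with
  | nil => simp [pvBScan]
  | cons e rest ih =>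
    rw [pvBScan]
    by_cases hek : e = k
    · subst hek
      rw [if_pos (by simp)]
      simp [pvMatches]
    · rw [if_neg (by simp [hek])]
      by_cases hend : PySem.Chars.endswith e ['.', '*'] = true
      · have hsuf : ['.', '*'] <:+ e := (PySem.Chars.endswith_iff e ['.', '*']).1 hend
        obtain ⟨q, hq⟩ := hsuf
        have hbase : PySem.List.slice e none (some (-2)) = q := by
          rw [PySem.List.slice_to_neg_ofNat e 2 (by omega)]
          rw [← hq]
          simp
        rw [if_pos hend, hbase]
        by_cases hm : (k == q || PySem.Chars.startswith k (q ++ ['.'])) = true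
        · rw [if_pos hm]
          simp only [Bool.or_eq_true, beq_iff_eq, PySem.Chars.startswith_iff] at hm
          constructor
          · intro _
            refine ⟨e, List.mem_cons_self, Or.inr ⟨q, hq.symm, ?_⟩⟩
            rcases hm with h | h
            · exact Or.inl h.symm
            · exact Or.inr h
          · intro _; rfl
        · rw [if_neg hm, ih]
          simp only [Bool.or_eq_true, beq_iff_eq, PySem.Chars.startswith_iff, not_or] at hm
          apply pv_scan_step
          rintro (h | ⟨q', hq', hcond⟩)
          · exact hek h
          · have hqq : q' = q := List.append_inj_left' (hq'.symm.trans hq.symm) rfl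
            subst hqq
            rcases hcond with h | h
            · exact hm.1 h.symm
            · exact hm.2 h
      · rw [if_neg hend, ih]
        apply pv_scan_step
        rintro (h | ⟨q', hq', _⟩)
        · exact hek h
        · exact hend ((PySem.Chars.endswith_iff e ['.', '*']).2 ⟨q', hq'.symm⟩)

-- A's loop is the scan over probe indices
theorem pvALoop_eq_true_iff (docs parts : List (List Char)) (is : List Int) :
    pvALoop docs parts is = true ↔
      ∃ i ∈ is, (PySem.Chars.join ['.'] (PySem.List.slice parts none (some i)) ++ ['.', '*']) ∈ docs := by
  induction is with
  | nil => simp [pvALoop]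
  | cons i rest ih =>
    rw [pvALoop]
    by_cases h : docs.contains (PySem.Chars.join ['.'] (PySem.List.slice parts none (some i)) ++ ['.', '*']) = true
    · rw [if_pos h]
      constructor
      · intro _; exact ⟨i, List.mem_cons_self, by simpa using h⟩
      · intro _; rfl
    · rw [if_neg h, ih]
      constructor
      · rintro ⟨j, hj, hm⟩; exact ⟨j, List.mem_cons_of_mem _ hj, hm⟩
      · rintro ⟨j, hj, hm⟩
        rcases List.mem_cons.1 hj with rfl | hj
        · exact absurd (by simpa using hm) h
        · exact ⟨j, hj, hm⟩

-- every piece of splitOn is separator-free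
theorem pv_not_mem_splitOn : ∀ (l : List Char), ∀ p ∈ l.splitOn '.', '.' ∉ p := by
  intro l
  induction l with
  | nil =>
    intro p hp
    rw [show ([] : List Char).splitOn '.' = [[]] from rfl] at hp
    simp only [List.mem_singleton] at hp
    subst hp; simp
  | cons c cs ih =>
    intro p hp
    rw [show (c :: cs).splitOn '.' = List.splitOnP (· == '.') (c :: cs) from rfl,
        List.splitOnP_cons] at hp
    by_cases hc : (c == '.') = true
    · rw [if_pos hc] at hp
      rcases List.mem_cons.1 hp with rfl | hp
      · simp
      · exact ih p hp
    · rw [if_neg hc] at hp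
      cases h : List.splitOnP (· == '.') cs with
      | nil => exact absurd h (List.splitOnP_ne_nil _ _)
      | cons q qs =>
        rw [h, List.modifyHead_cons] at hp
        rcases List.mem_cons.1 hp with rfl | hp
        · have hq : '.' ∉ q := ih q (by
            rw [show cs.splitOn '.' = List.splitOnP (· == '.') cs from rfl, h]
            exact List.mem_cons_self)
          intro hmem
          rcases List.mem_cons.1 hmem with h1 | h2
          · exact absurd h1.symm (by simpa using hc)
          · exact hq h2
        · exact ih p (by
            rw [show cs.splitOn '.' = List.splitOnP (· == '.') cs from rfl, h]
            exact List.mem_cons_of_mem _ hp)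

-- '.'.join of a nonempty list of parts peels off its first part
theorem pv_intercalate_cons (p : List Char) (ps : List (List Char)) (h : ps ≠ []) :
    ['.'].intercalate (p :: ps) = p ++ '.' :: ['.'].intercalate ps := by
  cases ps with
  | nil => exact absurd rfl h
  | cons a l => simp [List.intercalate, List.intersperse_cons₂]

-- prefix decomposition along the first separator-free block
theorem pv_prefix_block : ∀ (p : List Char), '.' ∉ p → ∀ (t q : List Char),
    (q ++ ['.'] <+: p ++ '.' :: t) ↔ (q = p ∨ ∃ q', q = p ++ '.' :: q' ∧ q' ++ ['.'] <+: t) := by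
  intro p
  induction p with
  | nil =>
    intro _ t q
    cases q with
    | nil => simp
    | cons c q0 =>
      simp only [List.nil_append, List.cons_append, List.cons_prefix_cons]
      constructor
      · rintro ⟨rfl, h⟩; exact Or.inr ⟨q0, rfl, h⟩
      · rintro (h | ⟨q', hq', hpre⟩)
        · exact absurd h (by simp)
        · simp only [List.cons.injEq] at hq'
          obtain ⟨rfl, rfl⟩ := hq'
          exact ⟨rfl, hpre⟩
  | cons a p0 ih =>
    intro hp t q
    have ha : a ≠ '.' := fun h => hp (by simp [h])
    have hp0 : '.' ∉ p0 := fun h => hp (List.mem_cons_of_mem _ h)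
    cases q with
    | nil =>
      simp only [List.nil_append, List.cons_append, List.cons_prefix_cons]
      constructor
      · rintro ⟨h, _⟩; exact absurd h.symm ha
      · rintro (h | ⟨q', hq', _⟩)
        · exact absurd h (by simp)
        · exact absurd hq' (by simp)
    | cons c q0 =>
      simp only [List.cons_append, List.cons_prefix_cons]
      rw [ih hp0 t q0]
      constructor
      · rintro ⟨rfl, h | ⟨q', rfl, hpre⟩⟩
        · exact Or.inl (by rw [h])
        · exact Or.inr ⟨q', rfl, hpre⟩
      · rintro (h | ⟨q', hq', hpre⟩)
        · obtain ⟨rfl, rfl⟩ : c = a ∧ q0 = p0 := by simpa using h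
          exact ⟨rfl, Or.inl rfl⟩
        · simp only [List.cons.injEq] at hq'
          obtain ⟨rfl, rfl⟩ := hq'
          exact ⟨rfl, Or.inr ⟨q', rfl, hpre⟩⟩

-- the dotted prefixes '.'.join(parts[:i]) are exactly: the whole key, or a prefix of it cut at a dot
theorem pv_take_join : ∀ (ps : List (List Char)), (∀ p ∈ ps, '.' ∉ p) → ps ≠ [] → ∀ (q : List Char),
    ((∃ i : ℕ, 1 ≤ i ∧ i ≤ ps.length ∧ q = ['.'].intercalate (ps.take i)) ↔
      (q = ['.'].intercalate ps ∨ q ++ ['.'] <+: ['.'].intercalate ps)) := by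
  intro ps
  induction ps with
  | nil => intro _ h; exact absurd rfl h
  | cons p ps ih =>
    intro hps _ q
    cases ps with
    | nil =>
      have hj : ['.'].intercalate [p] = p := by simp [List.intercalate]
      constructor
      · rintro ⟨i, h1, h2, rfl⟩
        obtain rfl : i = 1 := by simp only [List.length_cons, List.length_nil] at h2; omega
        exact Or.inl (by simp [hj])
      · rintro (rfl | hpre)
        · exact ⟨1, le_rfl, by simp, by simp [hj]⟩
        · exfalso
          obtain ⟨t, ht⟩ := hpre
          apply hps p List.mem_cons_self
          rw [hj] at ht
          rw [← ht]; simp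
    | cons p2 ps2 =>
      have hj := pv_intercalate_cons p (p2 :: ps2) (by simp)
      have hp : '.' ∉ p := hps p List.mem_cons_self
      have hps' : ∀ x ∈ p2 :: ps2, '.' ∉ x := fun x hx => hps x (List.mem_cons_of_mem _ hx)
      have ihx := ih hps' (by simp)
      rw [hj, pv_prefix_block p hp (['.'].intercalate (p2 :: ps2)) q]
      constructor
      · rintro ⟨i, h1, h2, rfl⟩
        cases i with
        | zero => omega
        | succ i0 =>
          cases i0 with
          | zero => exact Or.inr (Or.inl (by simp [List.intercalate]))
          | succ j =>
            have hj1 : 1 ≤ j + 1 := by omega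
            have hj2 : j + 1 ≤ (p2 :: ps2).length := by
              simp only [List.length_cons] at h2 ⊢; omega
            have htake : (p :: p2 :: ps2).take (j + 2) = p :: (p2 :: ps2).take (j + 1) := rfl
            have hjoin2 := pv_intercalate_cons p ((p2 :: ps2).take (j + 1)) (by simp)
            rw [htake, hjoin2]
            rcases (ihx (['.'].intercalate ((p2 :: ps2).take (j + 1)))).1 ⟨j + 1, hj1, hj2, rfl⟩ with h | h
            · exact Or.inl (by rw [h])
            · exact Or.inr (Or.inr ⟨_, rfl, h⟩)
      · rintro (rfl | h | ⟨q', rfl, hpre⟩)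
        · refine ⟨(p2 :: ps2).length + 1, by omega, by simp, ?_⟩
          rw [List.take_of_length_le (by simp), hj]
        · exact ⟨1, le_rfl, by simp, by rw [h]; simp [List.intercalate]⟩
        · obtain ⟨i, h1, h2, h3⟩ := (ihx q').2 (Or.inr hpre)
          refine ⟨i + 1, by omega, by simp only [List.length_cons] at h2 ⊢; omega, ?_⟩
          have hne2 : (p2 :: ps2).take i ≠ [] := by
            intro hnil
            rw [List.take_eq_nil_iff] at hnil
            rcases hnil with h0 | h0
            · omega
            · simp at h0
          have htake : (p :: p2 :: ps2).take (i + 1) = p :: (p2 :: ps2).take i := rfl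
          rw [htake, pv_intercalate_cons p _ hne2, ← h3]

-- A's result, characterised as the same scan for pvMatches
theorem pvA_iff (k : List Char) (docs : List (List Char)) :
    (if docs.contains k then true
     else pvALoop docs (k.splitOn '.') (PySem.List.pyRange 1 (((k.splitOn '.').length : Int) + 1) 1)) = true
      ↔ ∃ e ∈ docs, pvMatches k e := by
  have hk : ['.'].intercalate (k.splitOn '.') = k := List.intercalate_splitOn k '.'
  have hne : k.splitOn '.' ≠ [] := List.splitOnP_ne_nil _ _
  constructor
  · intro h
    by_cases hmem : docs.contains k = true
    · exact ⟨k, by simpa using hmem, Or.inl rfl⟩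
    · rw [if_neg (by simp_all)] at h
      obtain ⟨i, hi, hin⟩ := (pvALoop_eq_true_iff _ _ _).1 h
      have hib := PySem.List.mem_pyRange_one.mp hi
      obtain ⟨j, rfl⟩ : ∃ j : ℕ, i = (j : Int) := ⟨i.toNat, by omega⟩
      rw [PySem.List.slice_to_natCast] at hin
      simp only [PySem.Chars.join] at hin
      have hq := (pv_take_join (k.splitOn '.') (pv_not_mem_splitOn k) hne
        (['.'].intercalate ((k.splitOn '.').take j))).1 ⟨j, by omega, by omega, rfl⟩
      rw [hk] at hq
      refine ⟨_, hin, Or.inr ⟨_, rfl, ?_⟩⟩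
      rcases hq with h | h
      · exact Or.inl h
      · exact Or.inr h
  · rintro ⟨e, he, hm⟩
    rcases hm with rfl | ⟨q, rfl, hq⟩
    · rw [if_pos (by simpa using he)]
    · by_cases hmem : docs.contains k = true
      · rw [if_pos hmem]
      · rw [if_neg (by simp_all)]
        have hq' : q = ['.'].intercalate (k.splitOn '.') ∨ q ++ ['.'] <+: ['.'].intercalate (k.splitOn '.') := by
          rw [hk]
          rcases hq with h | h
          · exact Or.inl h
          · exact Or.inr h
        obtain ⟨i, h1, h2, h3⟩ := (pv_take_join (k.splitOn '.') (pv_not_mem_splitOn k) hne q).2 hq'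
        apply (pvALoop_eq_true_iff _ _ _).2
        refine ⟨(i : Int), PySem.List.mem_pyRange_one.mpr (by omega), ?_⟩
        rw [PySem.List.slice_to_natCast]
        simp only [PySem.Chars.join]
        rw [← h3]
        exact he

-- ===== VERDICT (by name: the statement is the Claim_ definition above) =====
theorem is_documented_py_spec : Claim_equal_is_documented_py := by
  intro key documented _
  unfold Spec_is_documented_py is_documented_py is_documented_py_alt
  simp only []
  rw [Bool.eq_iff_iff, pvBScan_eq_true_iff]
  exact pvA_iff key.toList (documented.map String.toList)
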